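-- pv_equiv track=rewrite | github.com/SchweizerischeBundesbahnen/rsp | rsp/utils/notebook_rendering.py | _get_difference_in_time_space
-- ===== SOURCE A (Python) =====
-- from typing import List
-- from typing import Tuple
--
-- def _get_difference_in_time_space(time_resource_matrix_a, time_resource_matrix_b) -> \
--         Tuple[List[List[Tuple[int, int]]], List[List[Tuple[int, int]]], int]:
--     """
--     Compute the difference between schedules and return in plot ready format
--     Parameters
--     ----------
--     time_resource_matrix_a
--     time_resource_matrix_b
--
--     Returns
--     -------
--
--     """
--     # Detect changes to original schedule
--     traces_influenced_agents = []
--     plotting_information_traces = []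
--     nr_influenced_agents = 0
--     for idx, trainrun in enumerate(time_resource_matrix_a):
--         trainrun_difference = []
--         for waypoint in trainrun:
--             if waypoint not in time_resource_matrix_b[idx]:
--                 if len(trainrun_difference) > 0:
--                     if waypoint[0] != trainrun_difference[-1][0]:
--                         trainrun_difference.append((None, None))
--                 trainrun_difference.append(waypoint)
--
--         if len(trainrun_difference) > 0:
--             traces_influenced_agents.append(trainrun_difference)
--             plotting_information_traces.append([True for i in range(len(time_resource_matrix_b[idx]))])
--             nr_influenced_agents += 1
--         else:
--             traces_influenced_agents.append([(None, None)])
--             plotting_information_traces.append([False for i in range(len(time_resource_matrix_b[idx]))])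
--
--     return traces_influenced_agents, plotting_information_traces, nr_influenced_agents
-- ===== SOURCE B (Python) =====
-- def _get_difference_in_time_space(time_resource_matrix_a, time_resource_matrix_b):
--     def gaps(changed):
--         # split `changed` into its maximal runs of equal first component,
--         # recursively, and join consecutive runs with a (None, None) separator
--         if not changed:
--             return []
--         head = changed[0][0]
--         i = 1
--         while i < len(changed) and changed[i][0] == head:
--             i += 1
--         rest = gaps(changed[i:])
--         return changed[:i] + ([(None, None)] + rest if rest else [])
--
--     traces_influenced_agents = []
--     plotting_information_traces = []
--     nr_influenced_agents = 0
--     for trainrun, other in zip(time_resource_matrix_a, time_resource_matrix_b):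
--         other_set = set(other)
--         changed = [wp for wp in trainrun if wp not in other_set]
--         traces_influenced_agents.append(gaps(changed) if changed else [(None, None)])
--         plotting_information_traces.append([bool(changed)] * len(other))
--         nr_influenced_agents += bool(changed)
--     return traces_influenced_agents, plotting_information_traces, nr_influenced_agents
-- ===== Notes on version B (the rewrite author's own statement) =====
-- stated objective: alternative
-- what changed: B replaces A's single interleaved inner loop (per-element membership test plus separator decision against the last appended element) by a filter pass computing the changed waypoints and a recursive run-splitting helper that groups `changed` into maximal runs of equal first component and joins the runs with (None, None) separators; masks and the counter are decided from whether `changed` is non-empty, and the outer loop iterates zip(a, b) instead of indexing b.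
import Mathlib
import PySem

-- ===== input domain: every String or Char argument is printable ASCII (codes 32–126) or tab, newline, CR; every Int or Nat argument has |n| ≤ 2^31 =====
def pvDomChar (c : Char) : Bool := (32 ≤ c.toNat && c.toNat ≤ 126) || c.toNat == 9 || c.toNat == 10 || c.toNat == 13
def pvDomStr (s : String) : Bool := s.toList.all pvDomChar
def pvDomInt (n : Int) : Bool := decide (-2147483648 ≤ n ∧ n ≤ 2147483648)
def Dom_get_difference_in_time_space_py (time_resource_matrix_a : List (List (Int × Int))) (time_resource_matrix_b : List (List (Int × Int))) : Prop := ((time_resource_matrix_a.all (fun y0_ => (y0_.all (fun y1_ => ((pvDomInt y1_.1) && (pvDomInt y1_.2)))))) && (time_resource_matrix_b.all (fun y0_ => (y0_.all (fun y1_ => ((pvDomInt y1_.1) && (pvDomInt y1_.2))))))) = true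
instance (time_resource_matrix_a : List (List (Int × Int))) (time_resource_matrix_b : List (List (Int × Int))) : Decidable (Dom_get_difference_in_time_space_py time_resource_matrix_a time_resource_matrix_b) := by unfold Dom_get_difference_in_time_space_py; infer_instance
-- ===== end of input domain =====

-- B replaces A's interleaved per-element loop by a filter pass followed by a recursive
-- run-splitting helper that joins maximal runs of equal first component with separators.

-- ===== PORT A =====
-- A's inner loop body: skip waypoints present in b[idx]; otherwise append, with a
-- (None, None) separator when the first component changes w.r.t. the last appended element.
def pvStepA (bidx : List (Int × Int)) (acc : List (Option Int × Option Int)) (wp : Int × Int) : List (Option Int × Option Int) :=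
  if wp ∈ bidx then acc
  else
    match acc.getLast? with
    | some last =>
        if (some wp.1 : Option Int) ≠ last.1 then acc ++ [(none, none), (some wp.1, some wp.2)]
        else acc ++ [(some wp.1, some wp.2)]
    | none => acc ++ [(some wp.1, some wp.2)]

-- A's outer for-loop over enumerate(time_resource_matrix_a), indexing time_resource_matrix_b.
def pvLoopA (b : List (List (Int × Int))) : List (List (Int × Int)) → Nat → (List (List (Option Int × Option Int))) × List (List Bool) × Int
  | [], _ => ([], [], 0)
  | tr :: rest, idx =>
    match PySem.List.pyGet? b (idx : Int) with
    | none => ([], [], 0)   -- Python raises IndexError here; excluded by Pre_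
    | some bidx =>
      let diff := tr.foldl (pvStepA bidx) []
      let tail := pvLoopA b rest (idx + 1)
      if diff.length > 0 then
        (diff :: tail.1, ((List.range bidx.length).map (fun _ => true)) :: tail.2.1, tail.2.2 + 1)
      else
        ([(none, none)] :: tail.1, ((List.range bidx.length).map (fun _ => false)) :: tail.2.1, tail.2.2)

def get_difference_in_time_space_py (time_resource_matrix_a : List (List (Int × Int))) (time_resource_matrix_b : List (List (Int × Int))) : (List (List (Option Int × Option Int))) × List (List Bool) × Int :=
  pvLoopA time_resource_matrix_b time_resource_matrix_a 0

-- ===== PORT B =====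
def pvLift (wp : Int × Int) : Option Int × Option Int := (some wp.1, some wp.2)

-- B's gaps(): peel the maximal leading run of equal first component, recurse on the rest,
-- and join with a (None, None) separator when the remainder is non-empty.
def pvGaps : List (Int × Int) → List (Option Int × Option Int)
  | [] => []
  | c :: cs =>
    let run := c :: cs.takeWhile (fun wp => wp.1 == c.1)
    let rest := pvGaps (cs.dropWhile (fun wp => wp.1 == c.1))
    run.map pvLift ++ (if rest.isEmpty then [] else ((none, none) : Option Int × Option Int) :: rest)
termination_by l => l.length
decreasing_by
  simpa using Nat.lt_succ_of_le (List.length_dropWhile_le _ cs)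

def get_difference_in_time_space_py_alt (time_resource_matrix_a : List (List (Int × Int))) (time_resource_matrix_b : List (List (Int × Int))) : (List (List (Option Int × Option Int))) × List (List Bool) × Int :=
  match time_resource_matrix_a, time_resource_matrix_b with
  | [], _ => ([], [], 0)
  | _ :: _, [] => ([], [], 0)   -- zip stops at the shorter list
  | tr :: as_, ot :: bs =>
    let other_set : PySem.Set (Int × Int) := PySem.Set.ofList ot
    let changed := tr.filter (fun wp => !(PySem.Set.contains other_set wp))
    let rest := get_difference_in_time_space_py_alt as_ bs
    ((if changed.isEmpty then [(none, none)] else pvGaps changed) :: rest.1,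
     List.replicate ot.length (!changed.isEmpty) :: rest.2.1,
     rest.2.2 + (if changed.isEmpty then 0 else 1))

-- ===== PRECONDITION & SPEC =====
-- Pre_ excludes exactly the inputs where A raises IndexError: len(a) > len(b),
-- so that time_resource_matrix_b[idx] is out of range for some agent.
def Pre_get_difference_in_time_space_py (time_resource_matrix_a : List (List (Int × Int))) (time_resource_matrix_b : List (List (Int × Int))) : Prop :=
  time_resource_matrix_a.length ≤ time_resource_matrix_b.length
instance (time_resource_matrix_a : List (List (Int × Int))) (time_resource_matrix_b : List (List (Int × Int))) : Decidable (Pre_get_difference_in_time_space_py time_resource_matrix_a time_resource_matrix_b) := by unfold Pre_get_difference_in_time_space_py; infer_instance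

def pvWitness_get_difference_in_time_space_py : (List (List (Int × Int))) × (List (List (Int × Int))) :=
  ([[(1, 2), (1, 3), (2, 4)]], [[(1, 3), (5, 6)]])

def Spec_get_difference_in_time_space_py (time_resource_matrix_a : List (List (Int × Int))) (time_resource_matrix_b : List (List (Int × Int))) (out : (List (List (Option Int × Option Int))) × List (List Bool) × Int) : Prop := out = get_difference_in_time_space_py_alt time_resource_matrix_a time_resource_matrix_b
instance (time_resource_matrix_a : List (List (Int × Int))) (time_resource_matrix_b : List (List (Int × Int))) (out : (List (List (Option Int × Option Int))) × List (List Bool) × Int) : Decidable (Spec_get_difference_in_time_space_py time_resource_matrix_a time_resource_matrix_b out) := by unfold Spec_get_difference_in_time_space_py; infer_instance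

-- ===== CLAIM (what is proved, stated in full; the proofs are below) =====
def Claim_equal_get_difference_in_time_space_py : Prop := ∀ (time_resource_matrix_a : List (List (Int × Int))) (time_resource_matrix_b : List (List (Int × Int))), Dom_get_difference_in_time_space_py time_resource_matrix_a time_resource_matrix_b → Pre_get_difference_in_time_space_py time_resource_matrix_a time_resource_matrix_b → Spec_get_difference_in_time_space_py time_resource_matrix_a time_resource_matrix_b (get_difference_in_time_space_py time_resource_matrix_a time_resource_matrix_b)

-- ===== LEMMAS AND PROOFS =====

-- Element-wise form of the gapped sequence, relative to the previous real waypoint p;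
-- A's fold is shown equal to this, and B's run-splitting pvGaps too.
def pvG : (Int × Int) → List (Int × Int) → List (Option Int × Option Int)
  | _, [] => []
  | p, x :: xs => (if x.1 ≠ p.1 then [(none, none), pvLift x] else [pvLift x]) ++ pvG x xs

lemma pvGaps_cons_aux : ∀ (n : Nat) (cs : List (Int × Int)), cs.length ≤ n →
    ∀ c, pvGaps (c :: cs) = pvLift c :: pvG c cs := by
  intro n
  induction n with
  | zero =>
      intro cs hcs c
      have : cs = [] := List.eq_nil_of_length_eq_zero (Nat.le_zero.mp hcs)
      subst this
      simp [pvGaps.eq_2, pvGaps.eq_1, pvG]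
  | succ n ih =>
      intro cs hcs c
      cases cs with
      | nil => simp [pvGaps.eq_2, pvGaps.eq_1, pvG]
      | cons x xs =>
          have hxs : xs.length ≤ n := by simpa using hcs
          have hrec := ih xs hxs x
          by_cases hx : x.1 = c.1
          · have hpred : (fun wp : Int × Int => wp.1 == x.1) = (fun wp : Int × Int => wp.1 == c.1) := by
              funext wp; rw [hx]
            rw [pvGaps.eq_2] at hrec ⊢
            rw [hpred] at hrec
            have hpx : ((fun wp : Int × Int => wp.1 == c.1) x) = true := by simp [hx]
            simp only [List.takeWhile_cons, List.dropWhile_cons, hpx, if_pos] at *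
            rw [pvG]
            simp only [hx, ne_eq, not_true_eq_false, if_false, List.map_cons, List.cons_append]
            exact congrArg (List.cons (pvLift c)) hrec
          · rw [pvGaps.eq_2]
            have hpx : ((fun wp : Int × Int => wp.1 == c.1) x) = false := by simp [hx]
            simp only [List.takeWhile_cons, List.dropWhile_cons, hpx, Bool.false_eq_true, if_false]
            rw [hrec, pvG]
            simp [hx, pvLift]

lemma pvGaps_cons (c : Int × Int) (cs : List (Int × Int)) :
    pvGaps (c :: cs) = pvLift c :: pvG c cs :=
  pvGaps_cons_aux cs.length cs le_rfl c

-- A's fold skips waypoints that are in bidx, hence equals the fold over the filtered list.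
lemma foldA_filter (bidx : List (Int × Int)) (tr : List (Int × Int)) (acc : List (Option Int × Option Int)) :
    tr.foldl (pvStepA bidx) acc = (tr.filter (fun wp => !(decide (wp ∈ bidx)))).foldl (pvStepA bidx) acc := by
  induction tr generalizing acc with
  | nil => rfl
  | cons x xs ih =>
      by_cases hx : x ∈ bidx
      · simp [List.foldl, List.filter, hx, pvStepA, ih]
      · simp [List.foldl, List.filter, hx, ih]

-- On a list disjoint from bidx, starting from an acc whose last element is a lifted waypoint p,
-- A's fold appends exactly the element-wise gapped sequence.
lemma gap_aux (bidx : List (Int × Int)) (xs : List (Int × Int)) :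
    ∀ (acc : List (Option Int × Option Int)) (p : Int × Int),
      (∀ wp ∈ xs, wp ∉ bidx) → acc.getLast? = some (pvLift p) →
      xs.foldl (pvStepA bidx) acc = acc ++ pvG p xs := by
  induction xs with
  | nil => intro acc p _ _; simp [pvG]
  | cons x xs ih =>
      intro acc p hdisj hlast
      have hx : x ∉ bidx := hdisj x (by simp)
      have hstep : pvStepA bidx acc x =
          acc ++ (if x.1 ≠ p.1 then [(none, none), pvLift x] else [pvLift x]) := by
        simp only [pvStepA, if_neg hx, hlast, pvLift]
        by_cases h : x.1 = p.1 <;> simp [h]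
      have hlast' : (pvStepA bidx acc x).getLast? = some (pvLift x) := by
        rw [hstep]; by_cases h : x.1 = p.1 <;> simp [h]
      calc (x :: xs).foldl (pvStepA bidx) acc
          = xs.foldl (pvStepA bidx) (pvStepA bidx acc x) := rfl
        _ = pvStepA bidx acc x ++ pvG x xs :=
            ih (pvStepA bidx acc x) x (fun wp hwp => hdisj wp (by simp [hwp])) hlast'
        _ = acc ++ pvG p (x :: xs) := by rw [hstep, pvG, List.append_assoc]

-- Per-agent: A's interleaved fold equals B's filter-then-run-splitting composition.
lemma inner_eq (bidx : List (Int × Int)) (tr : List (Int × Int)) :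
    tr.foldl (pvStepA bidx) [] = pvGaps (tr.filter (fun wp => !(decide (wp ∈ bidx)))) := by
  rw [foldA_filter]
  generalize hch : tr.filter (fun wp => !(decide (wp ∈ bidx))) = changed
  have hdisj : ∀ wp ∈ changed, wp ∉ bidx := by
    intro wp hwp
    rw [← hch] at hwp
    have := List.of_mem_filter hwp
    simpa using this
  cases changed with
  | nil => simp [pvGaps.eq_1]
  | cons c cs =>
      have hc : c ∉ bidx := hdisj c List.mem_cons_self
      have h1 : pvStepA bidx [] c = [pvLift c] := by simp [pvStepA, hc, pvLift]
      calc (c :: cs).foldl (pvStepA bidx) []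
          = cs.foldl (pvStepA bidx) (pvStepA bidx [] c) := rfl
        _ = cs.foldl (pvStepA bidx) [pvLift c] := by rw [h1]
        _ = [pvLift c] ++ pvG c cs := by
              apply gap_aux bidx cs _ c (fun wp hwp => hdisj wp (List.mem_cons_of_mem c hwp))
              simp
        _ = pvGaps (c :: cs) := by rw [pvGaps_cons]; simp

-- B's filter predicate (set membership) agrees with plain list membership.
lemma filter_set_eq (ot tr : List (Int × Int)) :
    tr.filter (fun wp => !(PySem.Set.contains (PySem.Set.ofList ot) wp))
      = tr.filter (fun wp => !(decide (wp ∈ ot))) := by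
  apply List.filter_congr
  intro wp _
  by_cases h : wp ∈ ot
  · simp [h, PySem.Set.mem_ofList]
  · simp [h, PySem.Set.mem_ofList]

lemma loop_eq (b : List (List (Int × Int))) (a : List (List (Int × Int))) :
    ∀ idx : Nat, a.length + idx ≤ b.length →
      pvLoopA b a idx = get_difference_in_time_space_py_alt a (b.drop idx) := by
  induction a with
  | nil => intro idx _; cases b.drop idx <;> rfl
  | cons tr rest ih =>
      intro idx hlen
      have hidx : idx < b.length := by simp at hlen; omega
      have hget : PySem.List.pyGet? b (idx : Int) = some b[idx] := by
        rw [PySem.List.pyGet?_natCast]; simp [hidx]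
      have hdrop : b.drop idx = b[idx] :: b.drop (idx + 1) := List.drop_eq_getElem_cons hidx
      rw [hdrop]
      show pvLoopA b (tr :: rest) idx = _
      rw [pvLoopA, hget]
      simp only [get_difference_in_time_space_py_alt]
      rw [ih (idx + 1) (by simp at hlen ⊢; omega)]
      set bidx := b[idx]
      rw [inner_eq bidx tr]
      rw [filter_set_eq bidx tr]
      set changed := tr.filter (fun wp => !(decide (wp ∈ bidx))) with hch
      have hmask : ∀ v : Bool, (List.range bidx.length).map (fun _ => v) = List.replicate bidx.length v := by
        intro v; simp [List.map_const']
      cases hc : changed with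
      | nil => simp [pvGaps.eq_1, hmask]
      | cons c cs => simp [pvGaps_cons, hmask]

-- ===== VERDICT (by name: the statement is the Claim_ definition above) =====
theorem get_difference_in_time_space_py_spec : Claim_equal_get_difference_in_time_space_py := by
  intro a b _ hpre
  unfold Spec_get_difference_in_time_space_py get_difference_in_time_space_py
  have := loop_eq b a 0 (by simpa using hpre)
  simpa using this
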